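-- pv_equiv track=rewrite | github.com/Friday930/capstone | wind1.py | rearrange_matrix_alternating
-- ===== SOURCE A (Python) =====
-- def rearrange_matrix_alternating(matrix):
--     rows = len(matrix)
--     cols = len(matrix[0])
--     new_matrix = []
--     for col in range(cols):
--         if col % 2 == 0:
--             for row in range(rows):
--                 new_matrix.append(matrix[row][col])
--         else:
--             for row in range(rows - 1, -1, -1):
--                 new_matrix.append(matrix[row][col])
--
--     return new_matrix
-- ===== SOURCE B (Python) =====
-- def rearrange_matrix_alternating(matrix):
--     rows = len(matrix)
--     cols = len(matrix[0])
--
--     def source_row(i):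
--         r = i % rows
--         return r if (i // rows) % 2 == 0 else rows - 1 - r
--
--     return [matrix[source_row(i)][i // rows] for i in range(rows * cols)]
-- ===== Notes on version B (the rewrite author's own statement) =====
-- stated objective: alternative
-- what changed: B replaces A's nested column loops with two opposite-direction inner row loops by a single flat pass over the output indices 0..rows*cols-1, computing each element's source row and column with closed-form index arithmetic (i % rows, i // rows, with the row flipped on odd columns).
import Mathlib
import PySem

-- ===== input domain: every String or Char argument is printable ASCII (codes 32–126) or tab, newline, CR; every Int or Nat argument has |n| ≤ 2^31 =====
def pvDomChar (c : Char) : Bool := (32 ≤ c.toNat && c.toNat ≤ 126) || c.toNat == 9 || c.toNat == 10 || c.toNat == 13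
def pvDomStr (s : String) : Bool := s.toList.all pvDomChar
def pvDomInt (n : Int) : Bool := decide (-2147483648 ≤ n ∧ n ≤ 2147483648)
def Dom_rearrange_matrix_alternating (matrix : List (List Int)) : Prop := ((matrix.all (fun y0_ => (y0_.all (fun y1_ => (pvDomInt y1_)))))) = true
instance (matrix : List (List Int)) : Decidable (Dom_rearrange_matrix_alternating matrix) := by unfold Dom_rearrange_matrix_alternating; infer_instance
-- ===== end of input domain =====

-- B flattens the snake in one flat pass over the output indices 0..rows*cols-1,
-- computing each element's source row/column by closed-form index arithmetic,
-- instead of A's nested column loops with two opposite-direction inner row loops.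

-- ===== PORT A =====
def rearrange_matrix_alternating (matrix : List (List Int)) : List Int :=
  let rows : Int := matrix.length
  let cols : Int := ((PySem.List.pyGetD matrix 0 []).length : Int)
  (PySem.List.pyRange 0 cols 1).foldl (fun new_matrix col =>
    if col % 2 == 0 then
      (PySem.List.pyRange 0 rows 1).foldl (fun nm row =>
        nm ++ [PySem.List.pyGetD (PySem.List.pyGetD matrix row []) col 0]) new_matrix
    else
      (PySem.List.pyRange (rows - 1) (-1) (-1)).foldl (fun nm row =>
        nm ++ [PySem.List.pyGetD (PySem.List.pyGetD matrix row []) col 0]) new_matrix) []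

-- ===== PORT B =====
-- helper: Python's source_row(i) — r = i % rows, flipped on odd columns
def pvSourceRow (rows : Int) (i : Int) : Int :=
  let r := PySem.Int.mod i rows
  if PySem.Int.mod (PySem.Int.floordiv i rows) 2 == 0 then r else rows - 1 - r

def rearrange_matrix_alternating_alt (matrix : List (List Int)) : List Int :=
  let rows : Int := matrix.length
  let cols : Int := ((PySem.List.pyGetD matrix 0 []).length : Int)
  (PySem.List.pyRange 0 (rows * cols) 1).map (fun i =>
    PySem.List.pyGetD (PySem.List.pyGetD matrix (pvSourceRow rows i) [])
      (PySem.Int.floordiv i rows) 0)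

-- ===== PRECONDITION & SPEC =====
-- Pre_ excludes exactly the inputs where A raises IndexError: the empty matrix
-- (matrix[0]) and ragged matrices with some row shorter than the first row.
def Pre_rearrange_matrix_alternating (matrix : List (List Int)) : Prop :=
  matrix ≠ [] ∧ ∀ row ∈ matrix, (matrix.headD []).length ≤ row.length
instance (matrix : List (List Int)) : Decidable (Pre_rearrange_matrix_alternating matrix) := by
  unfold Pre_rearrange_matrix_alternating; infer_instance
def pvWitness_rearrange_matrix_alternating : List (List Int) := [[1, 2, 3], [4, 5, 6]]
def Spec_rearrange_matrix_alternating (matrix : List (List Int)) (out : List Int) : Prop := out = rearrange_matrix_alternating_alt matrix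
instance (matrix : List (List Int)) (out : List Int) : Decidable (Spec_rearrange_matrix_alternating matrix out) := by unfold Spec_rearrange_matrix_alternating; infer_instance

-- ===== CLAIM (what is proved, stated in full; the proofs are below) =====
def Claim_equal_rearrange_matrix_alternating : Prop := ∀ (matrix : List (List Int)), Dom_rearrange_matrix_alternating matrix → Pre_rearrange_matrix_alternating matrix → Spec_rearrange_matrix_alternating matrix (rearrange_matrix_alternating matrix)

-- ===== LEMMAS AND PROOFS =====

-- The forward inner loop of A reads exactly the column c of the matrix.
theorem pv_col_map (m : List (List Int)) (c : Int) :
    (PySem.List.pyRange 0 (m.length : Int) 1).map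
        (fun j => PySem.List.pyGetD (PySem.List.pyGetD m j []) c 0)
      = m.map (fun r => PySem.List.pyGetD r c 0) := by
  conv_rhs => rw [← PySem.List.map_pyGetD_pyRange_zero' m ([] : List Int)]
  rw [List.map_map]
  rfl

-- A's outer-loop body, rewritten as appending the (possibly reversed) column.
theorem pv_step_eq (m : List (List Int)) :
    (fun (acc : List Int) (col : Int) =>
      if col % 2 == 0 then
        (PySem.List.pyRange 0 (m.length : Int) 1).foldl (fun nm row =>
          nm ++ [PySem.List.pyGetD (PySem.List.pyGetD m row []) col 0]) acc
      else
        (PySem.List.pyRange ((m.length : Int) - 1) (-1) (-1)).foldl (fun nm row =>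
          nm ++ [PySem.List.pyGetD (PySem.List.pyGetD m row []) col 0]) acc)
    = (fun (acc : List Int) (col : Int) =>
        acc ++ (if col % 2 == 1 then (m.map (fun r => PySem.List.pyGetD r col 0)).reverse
                else m.map (fun r => PySem.List.pyGetD r col 0))) := by
  funext acc col
  simp only [PySem.List.foldl_append_singleton_eq_map]
  have hrev : PySem.List.pyRange ((m.length : Int) - 1) (-1) (-1)
      = (PySem.List.pyRange 0 (m.length : Int) 1).reverse := by
    rw [PySem.List.pyRange_neg_one_eq_reverse]
    norm_num
  have hmod : (col % 2 == 0) = !(col % 2 == 1) := by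
    rcases Int.emod_two_eq_zero_or_one col with h | h <;> simp [h]
  rw [hrev, List.map_reverse, pv_col_map, hmod]
  cases h : (col % 2 == 1) <;> simp

-- Reading column c forward, over Nat indices.
theorem pv_col_nat (m : List (List Int)) (c : Int) :
    (List.range m.length).map
        (fun (k : Nat) => PySem.List.pyGetD (PySem.List.pyGetD m ((k : Nat) : Int) []) c 0)
      = m.map (fun r => PySem.List.pyGetD r c 0) := by
  have h : PySem.List.pyRange 0 (m.length : Int) 1
      = (List.range m.length).map (fun (k : Nat) => ((k : Nat) : Int)) := by
    rw [PySem.List.pyRange_one]; simp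
  have h2 := pv_col_map m c
  rw [h, List.map_map] at h2
  exact h2

-- Reading column c with flipped row index yields the reversed column.
theorem pv_col_nat_rev (m : List (List Int)) (c : Int) :
    (List.range m.length).map
        (fun (k : Nat) => PySem.List.pyGetD (PySem.List.pyGetD m ((m.length : Int) - 1 - ((k : Nat) : Int)) []) c 0)
      = (m.map (fun r => PySem.List.pyGetD r c 0)).reverse := by
  apply List.ext_getElem
  · simp
  · intro i hi1 hi2
    have hR : i < m.length := by simpa using hi2
    simp only [List.getElem_map, List.getElem_range, List.getElem_reverse, List.length_map]
    have h1 : ((m.length : Int) - 1 - ((i : Nat) : Int)) = ((m.length - 1 - i : Nat) : Int) := by omega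
    rw [h1, PySem.List.pyGetD_natCast, List.getD_eq_getElem _ _ (by omega)]

-- One block of B's flat pass is exactly the (possibly reversed) column C.
theorem pv_block (m : List (List Int)) (C : Nat) :
    (PySem.List.pyRange ((m.length * C : Nat) : Int) (((m.length * C : Nat) : Int) + (m.length : Int)) 1).map
        (fun i => PySem.List.pyGetD (PySem.List.pyGetD m (pvSourceRow (m.length : Int) i) [])
          (PySem.Int.floordiv i (m.length : Int)) 0)
      = (if (C : Int) % 2 == 1 then (m.map (fun r => PySem.List.pyGetD r (C : Int) 0)).reverse
          else m.map (fun r => PySem.List.pyGetD r (C : Int) 0)) := by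
  rcases Nat.eq_zero_or_pos m.length with hR | hR
  · have hm : m = [] := List.length_eq_zero_iff.mp hR
    subst hm
    simp [PySem.List.pyRange_one_eq_nil]
  · rw [PySem.List.pyRange_one]
    have hlen : ((((m.length * C : Nat) : Int) + (m.length : Int)) - ((m.length * C : Nat) : Int)).toNat = m.length := by
      omega
    rw [hlen]
    have hval : ∀ k ∈ List.range m.length,
        (fun i => PySem.List.pyGetD (PySem.List.pyGetD m (pvSourceRow (m.length : Int) i) [])
          (PySem.Int.floordiv i (m.length : Int)) 0)
          (((m.length * C : Nat) : Int) + (k : Int))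
        = PySem.List.pyGetD (PySem.List.pyGetD m
            (if (C : Int) % 2 == 0 then (k : Int) else (m.length : Int) - 1 - (k : Int)) [])
            (C : Int) 0 := by
      intro k hk
      have hk' : k < m.length := List.mem_range.mp hk
      have hi : ((m.length * C : Nat) : Int) + (k : Int) = ((m.length * C + k : Nat) : Int) := by
        push_cast; ring
      have hdiv : PySem.Int.floordiv ((m.length * C + k : Nat) : Int) (m.length : Int) = (C : Int) := by
        rw [PySem.Int.floordiv_natCast]
        congr 1
        rw [Nat.mul_add_div hR, Nat.div_eq_of_lt hk']
        rfl
      have hmod : PySem.Int.mod ((m.length * C + k : Nat) : Int) (m.length : Int) = (k : Int) := by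
        rw [PySem.Int.mod_natCast]
        congr 1
        rw [Nat.mul_add_mod, Nat.mod_eq_of_lt hk']
      simp only [hi, pvSourceRow, hdiv, hmod]
      rw [PySem.Int.mod_eq_emod_of_pos (by norm_num : (0:Int) < 2)]
    have hmap := List.map_congr_left hval
    rw [List.map_map]
    refine Eq.trans hmap ?_
    rcases Int.emod_two_eq_zero_or_one (C : Int) with h | h
    · simp only [h, show (((0:Int) == 0) = true) from rfl, show (((0:Int) == 1) = false) from rfl,
        if_true, Bool.false_eq_true, if_false]
      exact pv_col_nat m (C : Int)
    · simp only [h, show (((1:Int) == 0) = false) from rfl, show (((1:Int) == 1) = true) from rfl,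
        if_true, Bool.false_eq_true, if_false]
      exact pv_col_nat_rev m (C : Int)

-- The whole equality, by induction on the number of columns.
theorem pv_main (m : List (List Int)) (C : Nat) :
    (PySem.List.pyRange 0 (C : Int) 1).flatMap
        (fun col => if col % 2 == 1 then (m.map (fun r => PySem.List.pyGetD r col 0)).reverse
                    else m.map (fun r => PySem.List.pyGetD r col 0))
      = (PySem.List.pyRange 0 ((m.length * C : Nat) : Int) 1).map
          (fun i => PySem.List.pyGetD (PySem.List.pyGetD m (pvSourceRow (m.length : Int) i) [])
            (PySem.Int.floordiv i (m.length : Int)) 0) := by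
  induction C with
  | zero => simp [PySem.List.pyRange_one_eq_nil]
  | succ n ih =>
    have h1 : ((n + 1 : Nat) : Int) = (n : Int) + 1 := by push_cast; ring
    rw [h1, PySem.List.pyRange_one_succ_right (by positivity), List.flatMap_append]
    have h2 : ((m.length * (n + 1) : Nat) : Int) = ((m.length * n : Nat) : Int) + (m.length : Int) := by
      push_cast; ring
    rw [h2]
    conv_rhs => rw [PySem.List.pyRange_one_append 0 ((m.length * n : Nat) : Int)
      (((m.length * n : Nat) : Int) + (m.length : Int)) (by positivity) (by omega)]
    rw [List.map_append, ih]
    simp only [List.flatMap_cons, List.flatMap_nil, List.append_nil]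
    congr 1
    exact (pv_block m n).symm

-- ===== VERDICT (by name: the statement is the Claim_ definition above) =====
theorem rearrange_matrix_alternating_spec : Claim_equal_rearrange_matrix_alternating := by
  intro matrix _ _
  show rearrange_matrix_alternating matrix = rearrange_matrix_alternating_alt matrix
  unfold rearrange_matrix_alternating rearrange_matrix_alternating_alt
  dsimp only
  rw [pv_step_eq matrix, PySem.List.foldl_append_eq_flatMap, List.nil_append]
  have hc : (matrix.length : Int) * ((PySem.List.pyGetD matrix 0 []).length : Int)
      = ((matrix.length * (PySem.List.pyGetD matrix 0 []).length : Nat) : Int) := by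
    push_cast; ring
  rw [hc]
  exact pv_main matrix _
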